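-- pv_equiv track=rewrite | github.com/skqls/cote | 2021_DM_B_01.py | solution
-- ===== SOURCE A (Python) =====
-- def solution(lottos, win_nums):
--     zero = 0
--     array = []
--     win_nums = set(win_nums)
--
--     for i in lottos:
--         if i == 0:
--             zero += 1
--         else :
--             array.append(i)
--     count = 0
--     for j in array :
--         if j in win_nums :
--             count += 1
--
--     max_num = count + zero
--     min_num = count
--     answer = []
--
--     if max_num == 6 :
--         answer.append(1)
--     elif max_num == 5 : answer.append(2)
--     elif max_num == 4 : answer.append(3)
--     elif max_num == 3 : answer.append(4)
--     elif max_num == 2 : answer.append(5)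
--     else : answer.append(6)
--
--     if min_num == 6 :
--         answer.append(1)
--     elif min_num == 5 : answer.append(2)
--     elif min_num == 4 : answer.append(3)
--     elif min_num == 3 : answer.append(4)
--     elif min_num == 2 : answer.append(5)
--     else : answer.append(6)
--
--     return(answer)
-- ===== SOURCE B (Python) =====
-- RANKS = [6, 6, 5, 4, 3, 2, 1]
--
--
-- def solution(lottos, win_nums):
--     xs = sorted(lottos)
--     ws = sorted(set(win_nums))
--     zero = 0
--     count = 0
--     j = 0
--     for x in xs:
--         if x == 0:
--             zero += 1
--         else:
--             while j < len(ws) and ws[j] < x: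
--                 j += 1
--             if j < len(ws) and ws[j] == x:
--                 count += 1
--     best = count + zero
--     return [RANKS[best] if best < 7 else 6, RANKS[count] if count < 7 else 6]
-- ===== Notes on version B (the rewrite author's own statement) =====
-- stated objective: alternative
-- what changed: B sorts lottos and the distinct win numbers and counts matches with a single two-pointer merge scan over the two sorted lists (no hash-set membership tests), then reads both ranks from a lookup table instead of A's two 6-way if/elif ladders.
import Mathlib
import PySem

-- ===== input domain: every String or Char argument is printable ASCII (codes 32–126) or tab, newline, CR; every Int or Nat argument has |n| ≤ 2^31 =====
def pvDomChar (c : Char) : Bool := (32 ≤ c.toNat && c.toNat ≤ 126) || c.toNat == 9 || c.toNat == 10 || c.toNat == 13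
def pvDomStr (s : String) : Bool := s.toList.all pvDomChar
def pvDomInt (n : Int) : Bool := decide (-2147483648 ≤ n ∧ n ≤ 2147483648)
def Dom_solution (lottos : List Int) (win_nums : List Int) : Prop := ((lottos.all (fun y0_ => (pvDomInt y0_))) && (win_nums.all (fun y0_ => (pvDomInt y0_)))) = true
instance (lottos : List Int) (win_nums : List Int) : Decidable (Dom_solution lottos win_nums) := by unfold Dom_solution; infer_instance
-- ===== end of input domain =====

-- B counts matches by sorting both lists and running a two-pointer merge scan, and reads ranks from a table; objective: alternative (sort-then-merge instead of hash membership).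


-- ===== PORT A =====
def solution (lottos : List Int) (win_nums : List Int) : List Int :=
  let wins := PySem.Set.ofList win_nums
  -- for i in lottos: if i == 0: zero += 1 else: array.append(i)
  let p := lottos.foldl
    (fun (s : Int × List Int) i => if i == 0 then (s.1 + 1, s.2) else (s.1, s.2 ++ [i]))
    ((0 : Int), ([] : List Int))
  let zero := p.1
  let array := p.2
  -- for j in array: if j in win_nums: count += 1
  let count := array.foldl (fun c j => if PySem.Set.contains wins j then c + 1 else c) (0 : Int)
  let max_num := count + zero
  let min_num := count
  let answer : List Int := []
  let answer := answer ++
    [if max_num == 6 then (1 : Int) else if max_num == 5 then 2 else if max_num == 4 then 3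
     else if max_num == 3 then 4 else if max_num == 2 then 5 else 6]
  let answer := answer ++
    [if min_num == 6 then (1 : Int) else if min_num == 5 then 2 else if min_num == 4 then 3
     else if min_num == 3 then 4 else if min_num == 2 then 5 else 6]
  answer

-- ===== PORT B =====
-- RANKS = [6, 6, 5, 4, 3, 2, 1]
def pvRanks : List Int := [6, 6, 5, 4, 3, 2, 1]

-- while j < len(ws) and ws[j] < x: j += 1
def pvAdvance (ws : List Int) (x : Int) (j : Nat) : Nat :=
  if h : j < ws.length ∧ ws[j]! < x then pvAdvance ws x (j + 1) else j
termination_by ws.length - j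
decreasing_by omega

def solution_alt (lottos : List Int) (win_nums : List Int) : List Int :=
  let xs := PySem.List.sorted lottos (fun x => x) false
  let ws := PySem.List.sorted (PySem.Set.ofList win_nums) (fun x => x) false
  -- state (zero, count, j); the two-pointer merge scan over the sorted lists
  let st := xs.foldl
    (fun (s : Int × Int × Nat) x =>
      if x == 0 then (s.1 + 1, s.2.1, s.2.2)
      else
        let j := pvAdvance ws x s.2.2
        if j < ws.length ∧ ws[j]! == x then (s.1, s.2.1 + 1, j) else (s.1, s.2.1, j))
    ((0 : Int), (0 : Int), (0 : Nat))
  let best := st.2.1 + st.1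
  [if best < 7 then pvRanks.getD best.toNat 6 else 6,
   if st.2.1 < 7 then pvRanks.getD st.2.1.toNat 6 else 6]

-- ===== PRECONDITION & SPEC =====
def Spec_solution (lottos : List Int) (win_nums : List Int) (out : List Int) : Prop := out = solution_alt lottos win_nums
instance (lottos : List Int) (win_nums : List Int) (out : List Int) : Decidable (Spec_solution lottos win_nums out) := by unfold Spec_solution; infer_instance

-- ===== CLAIM (what is proved, stated in full; the proofs are below) =====
def Claim_equal_solution : Prop := ∀ (lottos : List Int) (win_nums : List Int), Dom_solution lottos win_nums → Spec_solution lottos win_nums (solution lottos win_nums)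

-- ===== LEMMAS AND PROOFS =====

-- A's first loop computes (zero count, the non-zero elements in order).
lemma loopA_eq (l : List Int) (z : Int) (arr : List Int) :
    l.foldl (fun (s : Int × List Int) i => if i == 0 then (s.1 + 1, s.2) else (s.1, s.2 ++ [i])) (z, arr)
      = (z + (l.countP (fun i => i == 0) : Nat), arr ++ l.filter (fun i => !(i == 0))) := by
  induction l generalizing z arr with
  | nil => simp
  | cons a t ih =>
    simp only [List.foldl_cons]
    by_cases h : a = 0
    · rw [if_pos (by simp [h]), ih]
      simp [h]
      omega
    · rw [if_neg (by simp [h]), ih]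
      simp [h]

-- A's counting loop is a countP.
lemma countLoop_eq (P : Int → Bool) (l : List Int) (c : Int) :
    l.foldl (fun c j => if P j then c + 1 else c) c = c + (l.countP P : Nat) := by
  induction l generalizing c with
  | nil => simp
  | cons a t ih =>
    by_cases h : P a
    · simp [h, ih]; omega
    · simp [h, ih]

lemma getBang_eq (ws : List Int) (i : Nat) (h : i < ws.length) : ws[i]! = ws[i] := by
  simp [List.getElem!_eq_getElem?_getD, List.getElem?_eq_getElem h]

-- pvAdvance never moves backwards and stays within the list.
lemma pvAdvance_ge (ws : List Int) (x : Int) (j : Nat) : j ≤ pvAdvance ws x j := by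
  unfold pvAdvance
  split
  · have := pvAdvance_ge ws x (j + 1); omega
  · exact le_rfl
termination_by ws.length - j
decreasing_by omega

lemma pvAdvance_le (ws : List Int) (x : Int) (j : Nat) (h : j ≤ ws.length) :
    pvAdvance ws x j ≤ ws.length := by
  unfold pvAdvance
  split
  · exact pvAdvance_le ws x (j + 1) (by omega)
  · exact h
termination_by ws.length - j
decreasing_by omega

-- every index passed over by pvAdvance holds a value < x
lemma pvAdvance_passed (ws : List Int) (x : Int) (j k : Nat)
    (hk1 : j ≤ k) (hk2 : k < pvAdvance ws x j) : ws[k]! < x := by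
  by_cases hc : j < ws.length ∧ ws[j]! < x
  · rw [pvAdvance, dif_pos hc] at hk2
    rcases Nat.eq_or_lt_of_le hk1 with h | h
    · exact h ▸ hc.2
    · exact pvAdvance_passed ws x (j + 1) k h hk2
  · rw [pvAdvance, dif_neg hc] at hk2; omega
termination_by ws.length - j
decreasing_by omega

-- pvAdvance stops at an index whose value is not < x (or at the end)
lemma pvAdvance_stop (ws : List Int) (x : Int) (j : Nat) :
    ¬ (pvAdvance ws x j < ws.length ∧ ws[pvAdvance ws x j]! < x) := by
  by_cases hc : j < ws.length ∧ ws[j]! < x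
  · rw [pvAdvance, dif_pos hc]
    exact pvAdvance_stop ws x (j + 1)
  · rw [pvAdvance, dif_neg hc]
    exact hc
termination_by ws.length - j
decreasing_by omega

-- On a strictly increasing ws, with everything before j already < x, the
-- two-pointer probe "ws[advance] == x" decides membership of x in ws.
lemma advance_hit_iff (ws : List Int) (hws : ws.Pairwise (· < ·)) (x : Int) (j : Nat)
    (hpre : ∀ k < j, ws[k]! < x) :
    ((pvAdvance ws x j < ws.length ∧ (ws[pvAdvance ws x j]! == x) = true) ↔ x ∈ ws) := by
  set a := pvAdvance ws x j with ha
  have hlt : ∀ k < a, ws[k]! < x := by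
    intro k hk
    by_cases hkj : k < j
    · exact hpre k hkj
    · exact pvAdvance_passed ws x j k (by omega) hk
  constructor
  · rintro ⟨h1, h2⟩
    have hx : ws[a]'h1 = x := by rw [← getBang_eq ws a h1]; exact beq_iff_eq.mp h2
    rw [← hx]; exact List.getElem_mem h1
  · intro hmem
    obtain ⟨k, hk, hke⟩ := List.mem_iff_getElem.mp hmem
    have hka : ¬ k < a := fun h => by
      have := hlt k h; rw [getBang_eq ws k hk, hke] at this; omega
    have hstop := pvAdvance_stop ws x j
    rw [← ha] at hstop
    have halen : a < ws.length := by omega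
    have hax : ¬ ws[a]! < x := fun h => hstop ⟨halen, h⟩
    have hak : a = k := by
      by_contra hne
      have hlt' : a < k := by omega
      have hmono := List.pairwise_iff_getElem.mp hws a k halen hk hlt'
      rw [getBang_eq ws a halen] at hax
      omega
    subst hak
    exact ⟨halen, by rw [getBang_eq ws a halen, hke]; simp⟩

-- The merge-scan fold counts zeros and matches.
lemma fold_merge (ws : List Int) (hws : ws.Pairwise (· < ·)) :
    ∀ (xs : List Int), xs.Pairwise (· ≤ ·) →
    ∀ (z c : Int) (j : Nat),
      (∀ k < j, ∀ x ∈ xs, x ≠ 0 → ws[k]! < x) →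
      (xs.foldl
        (fun (s : Int × Int × Nat) x =>
          if x == 0 then (s.1 + 1, s.2.1, s.2.2)
          else
            let j := pvAdvance ws x s.2.2
            if j < ws.length ∧ ws[j]! == x then (s.1, s.2.1 + 1, j) else (s.1, s.2.1, j))
        (z, c, j)).1 = z + (xs.countP (fun x => x == 0) : Nat)
      ∧
      (xs.foldl
        (fun (s : Int × Int × Nat) x =>
          if x == 0 then (s.1 + 1, s.2.1, s.2.2)
          else
            let j := pvAdvance ws x s.2.2
            if j < ws.length ∧ ws[j]! == x then (s.1, s.2.1 + 1, j) else (s.1, s.2.1, j))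
        (z, c, j)).2.1 = c + (xs.countP (fun x => !(x == 0) && decide (x ∈ ws)) : Nat) := by
  intro xs
  induction xs with
  | nil => intro _ z c j _; simp
  | cons x t ih =>
    intro hsorted z c j hinv
    have hst : t.Pairwise (· ≤ ·) := hsorted.of_cons
    have hxle : ∀ r ∈ t, x ≤ r := fun r hr => (List.pairwise_cons.mp hsorted).1 r hr
    simp only [List.foldl_cons]
    by_cases hx0 : x = 0
    · rw [if_pos (by simp [hx0])]
      have := ih hst (z + 1) c j (fun k hk r hr hrne => hinv k hk r (by simp [hr]) hrne)
      refine ⟨?_, ?_⟩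
      · rw [this.1, List.countP_cons]
        simp [hx0]; ring
      · rw [this.2, List.countP_cons]
        simp [hx0]
    · rw [if_neg (by simp [hx0])]
      have hpre : ∀ k < j, ws[k]! < x := fun k hk => hinv k hk x (by simp) hx0
      have hhit := advance_hit_iff ws hws x j hpre
      set a := pvAdvance ws x j with ha
      have hinv' : ∀ k < a, ∀ r ∈ t, r ≠ 0 → ws[k]! < r := by
        intro k hk r hr hrne
        have hkx : ws[k]! < x := by
          by_cases hkj : k < j
          · exact hpre k hkj
          · exact pvAdvance_passed ws x j k (by omega) hk
        have := hxle r hr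
        omega
      show ((t.foldl _ (if a < ws.length ∧ (ws[a]! == x) = true then (z, c + 1, a) else (z, c, a))).1 = _)
        ∧ ((t.foldl _ (if a < ws.length ∧ (ws[a]! == x) = true then (z, c + 1, a) else (z, c, a))).2.1 = _)
      by_cases hcase : a < ws.length ∧ (ws[a]! == x) = true
      · have hmem : x ∈ ws := hhit.mp hcase
        rw [if_pos hcase]
        have := ih hst z (c + 1) a hinv'
        refine ⟨?_, ?_⟩
        · rw [this.1, List.countP_cons]; simp [hx0]
        · rw [this.2, List.countP_cons]
          simp [hx0, hmem]; ring
      · have hmem : x ∉ ws := fun hm => hcase (hhit.mpr hm)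
        rw [if_neg hcase]
        have := ih hst z c a hinv'
        refine ⟨?_, ?_⟩
        · rw [this.1, List.countP_cons]; simp [hx0]
        · rw [this.2, List.countP_cons]; simp [hmem]

-- The 6-way ladder equals the table lookup (for the nonnegative counts that arise).
lemma ladder_eq_table (n : Int) (hn : 0 ≤ n) :
    (if n == 6 then (1 : Int) else if n == 5 then 2 else if n == 4 then 3
     else if n == 3 then 4 else if n == 2 then 5 else 6)
      = (if n < 7 then pvRanks.getD n.toNat 6 else 6) := by
  by_cases h7 : n < 7
  · interval_cases n <;> decide
  · simp only [beq_iff_eq]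
    split_ifs <;> omega

-- ===== VERDICT (by name: the statement is the Claim_ definition above) =====
theorem solution_spec : Claim_equal_solution := by
  intro lottos win_nums _
  show solution lottos win_nums = solution_alt lottos win_nums
  unfold solution solution_alt
  simp only [loopA_eq, countLoop_eq, List.nil_append, List.countP_filter, zero_add]
  set ws := PySem.List.sorted (PySem.Set.ofList win_nums) (fun x => x) false with hwsdef
  set xs := PySem.List.sorted lottos (fun x => x) false with hxsdef
  have hws : ws.Pairwise (· < ·) := PySem.List.sorted_ofList_pairwise_lt win_nums
  have hxs : xs.Pairwise (· ≤ ·) := by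
    have := PySem.List.sorted_pairwise lottos (fun x => x)
    simpa using this
  have hperm : xs.Perm lottos := PySem.List.sorted_perm lottos (fun x => x) false
  have hfold := fold_merge ws hws xs hxs 0 0 0 (by intro k hk; omega)
  rw [hfold.1, hfold.2]
  have hzero : xs.countP (fun x => x == 0) = lottos.countP (fun x => x == 0) :=
    hperm.countP_eq _
  have hcnt : xs.countP (fun x => !(x == 0) && decide (x ∈ ws))
      = lottos.countP (fun i => PySem.Set.contains (PySem.Set.ofList win_nums) i && !(i == 0)) := by
    rw [hperm.countP_eq _]
    apply List.countP_congr
    intro x _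
    have hmem : (x ∈ ws) ↔ x ∈ PySem.Set.ofList win_nums := by
      rw [hwsdef]; exact PySem.List.mem_sorted _ _ _ x
    by_cases h : x ∈ PySem.Set.ofList win_nums <;>
      simp [PySem.Set.contains, hmem, h, Bool.and_comm]
  rw [hzero, hcnt]
  simp only [zero_add]
  rw [← ladder_eq_table _ (by positivity), ← ladder_eq_table _ (by positivity)]
  simp
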